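-- pv_equiv track=rewrite | github.com/josla8503/bb84-diploma-kiimo48 | postprocessing.py | _bisect_correct
-- ===== SOURCE A (Python) =====
-- def _parity(block: list[int]) -> int:
--     result = 0
--     for b in block:
--         result ^= b
--     return result
--
-- def _bisect_correct(alice_block: list[int], bob_block: list[int]) -> list[int]:
--     bob = bob_block[:]
--     lo, hi = 0, len(bob)
--     while hi - lo > 1:
--         mid = (lo + hi) // 2
--         if _parity(alice_block[lo:mid]) != _parity(bob[lo:mid]):
--             hi = mid
--         else:
--             lo = mid
--     if lo < len(bob):
--         bob[lo] ^= 1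
--     return bob
-- ===== SOURCE B (Python) =====
-- def _bisect_correct(alice_block: list[int], bob_block: list[int]) -> list[int]:
--     # One zero-padded XOR-difference list; the search is a divide-and-conquer
--     # recursion on segments of that single list instead of index arithmetic
--     # re-slicing both blocks.
--     diff = [(alice_block[i] if i < len(alice_block) else 0) ^ b
--             for i, b in enumerate(bob_block)]
--
--     def locate(seg, offset):
--         if len(seg) <= 1:
--             return offset
--         half = len(seg) // 2
--         left = seg[:half]
--         p = 0
--         for d in left:
--             p ^= d
--         if p != 0:
--             return locate(left, offset)
--         return locate(seg[half:], offset + half)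
--
--     out = list(bob_block)
--     lo = locate(diff, 0)
--     if lo < len(out):
--         out[lo] ^= 1
--     return out
-- ===== Notes on version B (the rewrite author's own statement) =====
-- stated objective: alternative
-- what changed: B folds the two blocks once into a single zero-padded XOR-difference list and locates the flip index by divide-and-conquer recursion on segments of that one list, instead of A's lo/hi while loop that re-slices and re-xors both blocks at every step.
import Mathlib
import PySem

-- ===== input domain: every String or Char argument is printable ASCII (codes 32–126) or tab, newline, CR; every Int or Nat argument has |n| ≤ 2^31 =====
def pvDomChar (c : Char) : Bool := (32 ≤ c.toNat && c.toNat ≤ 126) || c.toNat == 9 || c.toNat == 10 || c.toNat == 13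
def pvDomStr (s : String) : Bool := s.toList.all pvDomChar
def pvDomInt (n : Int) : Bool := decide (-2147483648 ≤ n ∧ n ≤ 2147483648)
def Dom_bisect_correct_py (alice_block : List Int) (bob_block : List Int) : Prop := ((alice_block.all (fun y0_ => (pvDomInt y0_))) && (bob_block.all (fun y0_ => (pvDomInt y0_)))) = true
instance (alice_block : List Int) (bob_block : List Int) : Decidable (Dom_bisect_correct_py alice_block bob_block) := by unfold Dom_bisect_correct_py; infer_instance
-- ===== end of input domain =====

-- B builds one zero-padded XOR-difference list and locates the flip index by
-- divide-and-conquer recursion on segments of that single list, instead of A's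
-- lo/hi while loop re-slicing and re-xoring both blocks each step.

-- ===== PORT A =====
-- _parity
def pvParity (block : List Int) : Int :=
  block.foldl (fun result b => PySem.Int.bxor result b) 0

-- the while-loop of _bisect_correct (state lo, hi); terminates because hi-lo shrinks
def pvLoopA (alice_block bob : List Int) (lo hi : Int) : Int :=
  if _h : hi - lo > 1 then
    let mid := PySem.Int.floordiv (lo + hi) 2
    if pvParity (PySem.List.slice alice_block (some lo) (some mid)) ≠
       pvParity (PySem.List.slice bob (some lo) (some mid)) then
      pvLoopA alice_block bob lo mid
    else
      pvLoopA alice_block bob mid hi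
  else lo
termination_by (hi - lo).toNat
decreasing_by
  · have h1 : lo + 1 ≤ PySem.Int.floordiv (lo + hi) 2 :=
      (PySem.Int.le_floordiv_iff_mul_le (by omega)).mpr (by omega)
    have h2 : PySem.Int.floordiv (lo + hi) 2 < hi :=
      (PySem.Int.floordiv_lt_iff_lt_mul (by omega)).mpr (by omega)
    omega
  · have h1 : lo + 1 ≤ PySem.Int.floordiv (lo + hi) 2 :=
      (PySem.Int.le_floordiv_iff_mul_le (by omega)).mpr (by omega)
    have h2 : PySem.Int.floordiv (lo + hi) 2 < hi :=
      (PySem.Int.floordiv_lt_iff_lt_mul (by omega)).mpr (by omega)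
    omega

def bisect_correct_py (alice_block : List Int) (bob_block : List Int) : List Int :=
  let bob := bob_block
  let lo := pvLoopA alice_block bob 0 bob.length
  if lo < (bob.length : Int) then
    PySem.List.pySetD bob lo (PySem.Int.bxor (PySem.List.pyGetD bob lo 0) 1)
  else bob

-- ===== PORT B =====
-- diff = [(alice_block[i] if i < len(alice_block) else 0) ^ b for i, b in enumerate(bob_block)]
def pvDiff (alice bob : List Int) : List Int :=
  (PySem.List.enumerate bob).map (fun ib =>
    PySem.Int.bxor
      (if ib.1 < (alice.length : Int) then PySem.List.pyGetD alice ib.1 0 else 0)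
      ib.2)

-- def locate(seg, offset): divide-and-conquer on the segment list
def pvLocate (seg : List Int) (offset : Int) : Int :=
  if _h : seg.length ≤ 1 then offset
  else
    let half : Int := PySem.Int.floordiv (seg.length : Int) 2
    let left := PySem.List.slice seg none (some half)
    let p := left.foldl (fun p d => PySem.Int.bxor p d) 0
    if p ≠ 0 then pvLocate left offset
    else pvLocate (PySem.List.slice seg (some half) none) (offset + half)
termination_by seg.length
decreasing_by
  · have hh : PySem.Int.floordiv (seg.length : Int) 2 = ((seg.length / 2 : Nat) : Int) := by
      exact_mod_cast PySem.Int.floordiv_natCast seg.length 2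
    rw [hh, PySem.List.slice_to_natCast, List.length_take]
    omega
  · have hh : PySem.Int.floordiv (seg.length : Int) 2 = ((seg.length / 2 : Nat) : Int) := by
      exact_mod_cast PySem.Int.floordiv_natCast seg.length 2
    rw [hh, PySem.List.slice_from_natCast, List.length_drop]
    omega

def bisect_correct_py_alt (alice_block : List Int) (bob_block : List Int) : List Int :=
  let diff := pvDiff alice_block bob_block
  let out := bob_block
  let lo := pvLocate diff 0
  if lo < (out.length : Int) then
    PySem.List.pySetD out lo (PySem.Int.bxor (PySem.List.pyGetD out lo 0) 1)
  else out

-- ===== PRECONDITION & SPEC =====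
def Spec_bisect_correct_py (alice_block : List Int) (bob_block : List Int) (out : List Int) : Prop := out = bisect_correct_py_alt alice_block bob_block
instance (alice_block : List Int) (bob_block : List Int) (out : List Int) : Decidable (Spec_bisect_correct_py alice_block bob_block out) := by unfold Spec_bisect_correct_py; infer_instance

-- ===== CLAIM (what is proved, stated in full; the proofs are below) =====
def Claim_equal_bisect_correct_py : Prop := ∀ (alice_block : List Int) (bob_block : List Int), Dom_bisect_correct_py alice_block bob_block → Spec_bisect_correct_py alice_block bob_block (bisect_correct_py alice_block bob_block)

-- ===== LEMMAS AND PROOFS =====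

-- two's-complement decomposition of bxor, to import Nat.xor algebra
def pvDec (s : Bool) (n : Nat) : Int := if s then -(n : Int) - 1 else (n : Int)
def pvEncN (a : Int) : Nat := if 0 ≤ a then a.toNat else (-a - 1).toNat

theorem pvBxor_enc (a b : Int) :
    PySem.Int.bxor a b = pvDec (xor (decide (a < 0)) (decide (b < 0))) (pvEncN a ^^^ pvEncN b) := by
  unfold PySem.Int.bxor pvDec pvEncN
  by_cases ha : 0 ≤ a <;> by_cases hb : 0 ≤ b
  · simp [ha, hb, not_lt.mpr ha, not_lt.mpr hb]
  · simp [ha, hb, not_lt.mpr ha, not_le.mp hb]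
  · simp [ha, hb, not_le.mp ha, not_lt.mpr hb]
  · simp [ha, hb, not_le.mp ha, not_le.mp hb]

theorem pvEncN_dec (s : Bool) (n : Nat) : pvEncN (pvDec s n) = n := by
  cases s
  · simp [pvDec, pvEncN]
  · simp [pvDec, pvEncN]
    omega

theorem pvSign_dec (s : Bool) (n : Nat) : decide (pvDec s n < 0) = s := by
  cases s
  · simp [pvDec]
  · simp [pvDec]
    omega

theorem pvBxor_assoc (a b c : Int) :
    PySem.Int.bxor (PySem.Int.bxor a b) c = PySem.Int.bxor a (PySem.Int.bxor b c) := by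
  rw [pvBxor_enc a b, pvBxor_enc b c,
      pvBxor_enc (pvDec (xor (decide (a < 0)) (decide (b < 0))) (pvEncN a ^^^ pvEncN b)) c,
      pvBxor_enc a (pvDec (xor (decide (b < 0)) (decide (c < 0))) (pvEncN b ^^^ pvEncN c)),
      pvEncN_dec, pvEncN_dec, pvSign_dec, pvSign_dec, Nat.xor_assoc, Bool.xor_assoc]

theorem pvZero_bxor (a : Int) : PySem.Int.bxor 0 a = a := by
  rw [PySem.Int.bxor_comm]; exact PySem.Int.bxor_zero a

theorem pvBxor_eq_zero_iff (a b : Int) : PySem.Int.bxor a b = 0 ↔ a = b := by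
  constructor
  · intro h
    have : PySem.Int.bxor (PySem.Int.bxor a b) b = PySem.Int.bxor 0 b := by rw [h]
    rwa [pvBxor_assoc, PySem.Int.bxor_self, PySem.Int.bxor_zero, pvZero_bxor] at this
  · intro h; rw [h]; exact PySem.Int.bxor_self b

theorem pvParity_shift (l : List Int) (c : Int) :
    l.foldl (fun r b => PySem.Int.bxor r b) c = PySem.Int.bxor c (pvParity l) := by
  induction l generalizing c with
  | nil => simp [pvParity, PySem.Int.bxor_zero]
  | cons x xs ih =>
    simp only [pvParity, List.foldl_cons] at *
    rw [ih (PySem.Int.bxor c x), ih (PySem.Int.bxor 0 x), pvZero_bxor, pvBxor_assoc]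

theorem pvParity_append (l₁ l₂ : List Int) :
    pvParity (l₁ ++ l₂) = PySem.Int.bxor (pvParity l₁) (pvParity l₂) := by
  unfold pvParity
  rw [List.foldl_append]
  exact pvParity_shift l₂ _

theorem pvParity_singleton (x : Int) : pvParity [x] = x := by
  simp only [pvParity, List.foldl_cons, List.foldl_nil]
  exact pvZero_bxor x

-- prefix parity and the difference prefix
def pvP (x : List Int) (m : Nat) : Int := pvParity (x.take m)
def pvQ (alice bob : List Int) (m : Nat) : Int :=
  PySem.Int.bxor (pvP alice m) (pvP bob m)

theorem pvParity_slice (x : List Int) (lo mid : Int) (h0 : 0 ≤ lo) (h1 : lo ≤ mid) :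
    pvParity (PySem.List.slice x (some lo) (some mid)) =
      PySem.Int.bxor (pvP x lo.toNat) (pvP x mid.toNat) := by
  rw [PySem.List.slice_toNat x h0 (le_trans h0 h1)]
  have hsplit : x.take mid.toNat = x.take lo.toNat ++ (x.drop lo.toNat).take (mid.toNat - lo.toNat) := by
    rw [← List.take_add]
    congr 1
    omega
  have := pvParity_append (x.take lo.toNat) ((x.drop lo.toNat).take (mid.toNat - lo.toNat))
  rw [← hsplit] at this
  unfold pvP
  rw [this, ← pvBxor_assoc, PySem.Int.bxor_self, pvZero_bxor]

-- parity of a take-of-drop segment, by the unconditional split take (l+k) = take l ++ (drop l).take k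
theorem pvParity_infix (x : List Int) (l k : Nat) :
    pvParity ((x.drop l).take k)
      = PySem.Int.bxor (pvParity (x.take l)) (pvParity (x.take (l + k))) := by
  have hsplit : x.take (l + k) = x.take l ++ (x.drop l).take k := List.take_add
  rw [hsplit, pvParity_append, ← pvBxor_assoc, PySem.Int.bxor_self, pvZero_bxor]

-- xor interchange: (a^b)^(c^d) = (a^c)^(b^d)
theorem pvXor4 (a b c d : Int) :
    PySem.Int.bxor (PySem.Int.bxor a b) (PySem.Int.bxor c d)
      = PySem.Int.bxor (PySem.Int.bxor a c) (PySem.Int.bxor b d) := by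
  rw [pvBxor_assoc, ← pvBxor_assoc b c d, PySem.Int.bxor_comm b c,
      pvBxor_assoc c b d, ← pvBxor_assoc]

theorem pvDiff_length (alice bob : List Int) : (pvDiff alice bob).length = bob.length := by
  simp [pvDiff, PySem.List.length_enumerate]

-- the prefix parity of the difference list is the xor of both blocks' prefix parities
theorem pvDiff_take (alice bob : List Int) :
    ∀ m : Nat, m ≤ bob.length →
      pvParity ((pvDiff alice bob).take m) = pvQ alice bob m := by
  intro m
  induction m with
  | zero =>
    intro _
    simp [pvQ, pvP, pvParity, PySem.Int.bxor_self]
  | succ m ih =>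
    intro hm
    have hmlt : m < bob.length := by omega
    have hdm : m < (pvDiff alice bob).length := by rw [pvDiff_length]; omega
    have hget : (pvDiff alice bob)[m] =
        PySem.Int.bxor
          (if (m : Int) < (alice.length : Int) then PySem.List.pyGetD alice (m : Int) 0 else 0)
          bob[m] := by
      simp [pvDiff, PySem.List.getElem_enumerate]
    have htake : (pvDiff alice bob).take (m + 1)
        = (pvDiff alice bob).take m ++ [(pvDiff alice bob)[m]] := by
      rw [List.take_add_one, List.getElem?_eq_getElem hdm]
      rfl
    rw [htake, pvParity_append, pvParity_singleton, ih (by omega), hget]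
    -- now compute pvQ (m+1) from pvQ m
    unfold pvQ pvP
    have hbt : bob.take (m + 1) = bob.take m ++ [bob[m]] := by
      rw [List.take_add_one, List.getElem?_eq_getElem hmlt]
      rfl
    by_cases hlt : m < alice.length
    · have hta : alice.take (m + 1) = alice.take m ++ [alice[m]] := by
        rw [List.take_add_one, List.getElem?_eq_getElem hlt]
        rfl
      have hif : (if (m : Int) < (alice.length : Int)
          then PySem.List.pyGetD alice (m : Int) 0 else 0) = alice[m] := by
        rw [if_pos (by exact_mod_cast hlt)]
        exact PySem.List.pyGetD_eq_getElem alice 0 (by positivity) (by exact_mod_cast hlt)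
      rw [hta, hbt, pvParity_append, pvParity_append, pvParity_singleton, pvParity_singleton,
          hif, pvXor4]
    · have hta : alice.take (m + 1) = alice.take m := by
        rw [List.take_of_length_le (by omega), List.take_of_length_le (by omega)]
      have hif : (if (m : Int) < (alice.length : Int)
          then PySem.List.pyGetD alice (m : Int) 0 else 0) = 0 := by
        rw [if_neg (by exact_mod_cast hlt)]
      rw [hta, hbt, pvParity_append, pvParity_singleton, hif, pvZero_bxor, pvBxor_assoc]

-- A's while loop equals B's segment recursion on the matching segment of the difference list
theorem pvLoop_locate (alice bob : List Int) :
    ∀ (fuel : Nat) (lo hi : Int), (hi - lo).toNat ≤ fuel →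
      0 ≤ lo → lo ≤ hi → hi ≤ (bob.length : Int) →
      pvLoopA alice bob lo hi
        = pvLocate (((pvDiff alice bob).drop lo.toNat).take (hi - lo).toNat) lo := by
  intro fuel
  induction fuel with
  | zero =>
    intro lo hi hf h0 h1 h2
    have hlen : (((pvDiff alice bob).drop lo.toNat).take (hi - lo).toNat).length ≤ 1 := by
      rw [List.length_take]
      omega
    rw [pvLoopA, pvLocate, dif_neg (by omega), dif_pos hlen]
  | succ f ih =>
    intro lo hi hf h0 h1 h2
    by_cases hgt : hi - lo > 1
    · have hseglen : (((pvDiff alice bob).drop lo.toNat).take (hi - lo).toNat).length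
          = (hi - lo).toNat := by
        rw [List.length_take, List.length_drop, pvDiff_length]
        omega
      rw [pvLoopA, pvLocate, dif_pos hgt, dif_neg (by omega)]
      have hmid1 : lo + 1 ≤ PySem.Int.floordiv (lo + hi) 2 :=
        (PySem.Int.le_floordiv_iff_mul_le (by omega)).mpr (by omega)
      have hmid2 : PySem.Int.floordiv (lo + hi) 2 < hi :=
        (PySem.Int.floordiv_lt_iff_lt_mul (by omega)).mpr (by omega)
      set mid := PySem.Int.floordiv (lo + hi) 2 with hmiddef
      set seg := ((pvDiff alice bob).drop lo.toNat).take (hi - lo).toNat with hsegdef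
      -- half = mid - lo
      have hhalf : PySem.Int.floordiv ((seg.length : Nat) : Int) 2 = mid - lo := by
        have h1 : PySem.Int.floordiv ((seg.length : Nat) : Int) 2
            = ((seg.length / 2 : Nat) : Int) := by
          exact_mod_cast PySem.Int.floordiv_natCast seg.length 2
        have h2 : mid * 2 ≤ lo + hi ∧ lo + hi < (mid + 1) * 2 := by
          constructor
          · exact (PySem.Int.le_floordiv_iff_mul_le (by omega)).mp (le_refl mid)
          · exact (PySem.Int.floordiv_lt_iff_lt_mul (by omega)).mp (by omega)
        rw [h1, hseglen]
        omega
      have hleft : PySem.List.slice seg none (some (mid - lo))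
          = ((pvDiff alice bob).drop lo.toNat).take (mid - lo).toNat := by
        rw [PySem.List.slice_to seg (show (0:Int) ≤ mid - lo by omega), hsegdef, List.take_take]
        congr 1
        omega
      have hp : pvParity (((pvDiff alice bob).drop lo.toNat).take (mid - lo).toNat)
          = PySem.Int.bxor (pvQ alice bob lo.toNat) (pvQ alice bob mid.toNat) := by
        have := pvParity_infix (pvDiff alice bob) lo.toNat (mid - lo).toNat
        rw [this, pvDiff_take alice bob lo.toNat (by omega),
            pvDiff_take alice bob (lo.toNat + (mid - lo).toNat) (by omega)]
        congr 2
        omega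
      have hcondA : (pvParity (PySem.List.slice alice (some lo) (some mid)) ≠
            pvParity (PySem.List.slice bob (some lo) (some mid))) ↔
          PySem.Int.bxor (pvQ alice bob lo.toNat) (pvQ alice bob mid.toNat) ≠ 0 := by
        rw [pvParity_slice alice lo mid h0 (by omega), pvParity_slice bob lo mid h0 (by omega)]
        rw [Ne, Ne, ← pvBxor_eq_zero_iff, pvXor4]
        rfl
      simp only [hhalf, hleft]
      have hfold : List.foldl (fun p d => PySem.Int.bxor p d) (0 : Int)
          (((pvDiff alice bob).drop lo.toNat).take (mid - lo).toNat)
          = pvParity (((pvDiff alice bob).drop lo.toNat).take (mid - lo).toNat) := by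
        rw [pvParity_shift, pvZero_bxor]
      rw [hfold]
      rw [← hp] at hcondA
      by_cases hc : pvParity (((pvDiff alice bob).drop lo.toNat).take (mid - lo).toNat) ≠ 0
      · rw [if_pos (hcondA.mpr hc), if_pos hc]
        exact ih lo mid (by omega) h0 (by omega) (by omega)
      · rw [if_neg (fun hx => hc (hcondA.mp hx)), if_neg hc]
        have hright : PySem.List.slice seg (some (mid - lo)) none
            = ((pvDiff alice bob).drop mid.toNat).take (hi - mid).toNat := by
          rw [PySem.List.slice_from seg (show (0:Int) ≤ mid - lo by omega), hsegdef, List.drop_take, List.drop_drop]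
          congr 1
          · omega
          · congr 1
            omega
        rw [hright]
        have hoff : lo + (mid - lo) = mid := by omega
        rw [hoff]
        exact ih mid hi (by omega) (by omega) (by omega) h2
    · have hlen : (((pvDiff alice bob).drop lo.toNat).take (hi - lo).toNat).length ≤ 1 := by
        rw [List.length_take]
        omega
      rw [pvLoopA, pvLocate, dif_neg (by omega), dif_pos hlen]

-- ===== VERDICT (by name: the statement is the Claim_ definition above) =====
theorem bisect_correct_py_spec : Claim_equal_bisect_correct_py := by
  intro alice bob _
  unfold Spec_bisect_correct_py
  simp only [bisect_correct_py, bisect_correct_py_alt]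
  have hseg : (((pvDiff alice bob).drop (0 : Int).toNat).take
      (((bob.length : Int) - 0)).toNat) = pvDiff alice bob := by
    simp [pvDiff_length]
  rw [pvLoop_locate alice bob (bob.length) 0 (bob.length : Int)
      (by simp) le_rfl (by positivity) le_rfl, hseg]
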